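-- pv_equiv track=rewrite | github.com/cottoncandy0919/Programming | Python/計實作業/P6-110502543.py | F
-- ===== SOURCE A (Python) =====
-- def F(n):
--     x=0
--     num=str(n)
--     if n>0 and n%2==0:
--         return 2+F(n//2)
--     elif n>0 and n%2!=0:
--         for j in range(len(str(n))):
--             x+=int(num[j])
--         return 3+F(x-5)
--     else:
--         return 0
-- ===== SOURCE B (Python) =====
-- def F(n):
--     # Iterative re-implementation: flat loop with a step-count accumulator;
--     # the digit sum is computed arithmetically (n % 10 / n // 10) instead of via str().
--     total = 0
--     while n > 0:
--         if n % 2 == 0: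
--             total += 2
--             n //= 2
--         else:
--             x = 0
--             m = n
--             while m > 0:
--                 x += m % 10
--                 m //= 10
--             total += 3
--             n = x - 5
--     return total
-- ===== Notes on version B (the rewrite author's own statement) =====
-- stated objective: alternative
-- what changed: Replaced the linear recursion by a flat while-loop with a running step-count accumulator, and replaced the str()/int() per-character digit-sum loop by an arithmetic mod-10/div-10 loop.
import Mathlib
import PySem

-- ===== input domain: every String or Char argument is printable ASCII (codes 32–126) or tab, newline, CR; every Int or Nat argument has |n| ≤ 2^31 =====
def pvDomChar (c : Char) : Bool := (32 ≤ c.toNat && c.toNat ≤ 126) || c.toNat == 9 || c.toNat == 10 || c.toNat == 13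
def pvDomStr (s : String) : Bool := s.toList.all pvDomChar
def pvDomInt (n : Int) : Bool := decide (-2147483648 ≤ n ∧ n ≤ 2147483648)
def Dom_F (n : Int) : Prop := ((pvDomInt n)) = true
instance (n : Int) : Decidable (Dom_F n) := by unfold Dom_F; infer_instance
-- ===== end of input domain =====

-- B replaces A's linear recursion by a flat accumulator loop and computes the digit
-- sum arithmetically (mod/div 10) instead of through str()/int(); same results, similar cost.


-- ===== PORT A =====
-- int(num[j]) for one character of str(n); in A's reachable uses the character is a digit
def digitVal (c : Char) : Int := (PySem.Int.ofChars? [c]).getD 0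

-- the odd-branch digit-sum loop of A: x=0; for j in range(len(str(n))): x += int(num[j])
def digitLoopA (n : Int) : Int :=
  (PySem.List.pyRange 0 (PySem.List.len (PySem.Int.toChars n)) 1).foldl
    (fun x j => x + digitVal (PySem.List.pyGetD (PySem.Int.toChars n) j ' ')) 0

-- A's recursion, made total by a fuel guard; fuel n.toNat + 1 provably suffices
-- (the recursion argument strictly decreases in .toNat: FImpl_fuel_irrel below), so the
-- 0-fuel branch is never reached from F.
def FImpl : Nat → Int → Int
  | 0, _ => 0
  | Nat.succ k, n =>
    if 0 < n ∧ PySem.Int.mod n 2 = 0 then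
      2 + FImpl k (PySem.Int.floordiv n 2)
    else if 0 < n ∧ PySem.Int.mod n 2 ≠ 0 then
      3 + FImpl k (digitLoopA n - 5)
    else 0

def F (n : Int) : Int := FImpl (n.toNat + 1) n

-- ===== PORT B =====
-- B's inner while loop (while m > 0: x += m % 10; m //= 10), fuel-guarded the same way
def digitSumBImpl : Nat → Int → Int → Int
  | 0, _, x => x
  | Nat.succ k, m, x =>
    if 0 < m then digitSumBImpl k (PySem.Int.floordiv m 10) (x + PySem.Int.mod m 10) else x

def digitSumB (m x : Int) : Int := digitSumBImpl (m.toNat + 1) m x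

-- B's outer while loop, total as the running accumulator
def F_altLoopImpl : Nat → Int → Int → Int
  | 0, _, total => total
  | Nat.succ k, n, total =>
    if 0 < n then
      if PySem.Int.mod n 2 = 0 then F_altLoopImpl k (PySem.Int.floordiv n 2) (total + 2)
      else F_altLoopImpl k (digitSumB n 0 - 5) (total + 3)
    else total

def F_alt (n : Int) : Int := F_altLoopImpl (n.toNat + 1) n 0

-- ===== PRECONDITION & SPEC =====
def Spec_F (n : Int) (out : Int) : Prop := out = F_alt n
instance (n : Int) (out : Int) : Decidable (Spec_F n out) := by unfold Spec_F; infer_instance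

-- ===== CLAIM (what is proved, stated in full; the proofs are below) =====
def Claim_equal_F : Prop := ∀ (n : Int), Dom_F n → Spec_F n (F n)

-- ===== LEMMAS AND PROOFS =====

theorem digitVal_digitChar (d : Nat) (hd : d < 10) : digitVal (Nat.digitChar d) = (d : Int) := by
  interval_cases d <;> decide

theorem sum_toDigits_le (m : Nat) (hm : 0 < m) :
    ((Nat.toDigits 10 m).map digitVal).sum ≤ (m : Int) := by
  induction m using Nat.strong_induction_on with
  | _ m ih =>
    rw [Nat.toDigits_eq_if (by norm_num)]
    by_cases h : m < 10
    · rw [if_pos h]; simp [digitVal_digitChar m h]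
    · rw [if_neg h]
      simp only [List.map_append, List.map_cons, List.map_nil, List.sum_append,
        List.sum_cons, List.sum_nil]
      have h1 : 0 < m / 10 := Nat.div_pos (by omega) (by norm_num)
      have h2 : m / 10 < m := Nat.div_lt_self hm (by norm_num)
      have := ih (m / 10) h2 h1
      rw [digitVal_digitChar (m % 10) (Nat.mod_lt m (by norm_num))]
      have hdm := Nat.div_add_mod m 10
      omega

-- A's per-character fold over str(n) is the digit-character sum of Nat.toDigits
theorem digitLoopA_eq_sum (n : Int) (hn : 0 < n) :
    digitLoopA n = ((Nat.toDigits 10 n.toNat).map digitVal).sum := by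
  unfold digitLoopA
  rw [PySem.List.foldl_pyRange_zero_pyGetD (PySem.Int.toChars n) ' '
        (fun x c => x + digitVal c) 0]
  have hfold : ∀ (cs : List Char) (a : Int),
      cs.foldl (fun x c => x + digitVal c) a = a + (cs.map digitVal).sum := by
    intro cs
    induction cs with
    | nil => simp
    | cons c cs ihc => intro a; simp [List.foldl_cons, ihc, add_assoc]
  rw [hfold, zero_add]
  have : PySem.Int.toChars n = Nat.toDigits 10 n.toNat := by
    unfold PySem.Int.toChars; rw [if_neg (by omega)]
  rw [this]

theorem digitLoopA_le (n : Int) (hn : 0 < n) : digitLoopA n ≤ n := by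
  rw [digitLoopA_eq_sum n hn]
  have := sum_toDigits_le n.toNat (by omega)
  omega

-- B's inner loop: the accumulator splits off
theorem digitSumBImpl_acc (k : Nat) : ∀ (m x : Int),
    digitSumBImpl k m x = x + digitSumBImpl k m 0 := by
  induction k with
  | zero => intro m x; simp [digitSumBImpl]
  | succ k ih =>
    intro m x
    by_cases hm : 0 < m
    · have e1 : digitSumBImpl (k + 1) m x
          = digitSumBImpl k (PySem.Int.floordiv m 10) (x + PySem.Int.mod m 10) := by
        rw [digitSumBImpl, if_pos hm]
      have e2 : digitSumBImpl (k + 1) m 0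
          = digitSumBImpl k (PySem.Int.floordiv m 10) (0 + PySem.Int.mod m 10) := by
        rw [digitSumBImpl, if_pos hm]
      rw [e1, e2, ih (PySem.Int.floordiv m 10) (x + PySem.Int.mod m 10),
        ih (PySem.Int.floordiv m 10) (0 + PySem.Int.mod m 10)]
      ring
    · have e1 : digitSumBImpl (k + 1) m x = x := by rw [digitSumBImpl, if_neg hm]
      have e2 : digitSumBImpl (k + 1) m 0 = 0 := by rw [digitSumBImpl, if_neg hm]
      rw [e1, e2]; ring

-- B's inner loop result is at most m (for any fuel), giving the loop-variant bound
theorem digitSumBImpl_le (k : Nat) : ∀ (m : Int), 0 ≤ m → digitSumBImpl k m 0 ≤ m := by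
  induction k with
  | zero => intro m hm; simpa [digitSumBImpl] using hm
  | succ k ih =>
    intro m hm
    by_cases h : 0 < m
    · rw [digitSumBImpl, if_pos h, digitSumBImpl_acc]
      have hmod := PySem.Int.mod_eq_emod_of_pos (a := m) (b := 10) (by norm_num)
      have hdiv := PySem.Int.floordiv_eq_ediv_of_pos (a := m) (b := 10) (by norm_num)
      have := ih (PySem.Int.floordiv m 10) (by rw [hdiv]; omega)
      omega
    · rw [digitSumBImpl, if_neg h]; omega

theorem digitSumB_acc (m x : Int) : digitSumB m x = x + digitSumB m 0 :=
  digitSumBImpl_acc _ _ _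

theorem digitSumB_le (m : Int) (hm : 0 ≤ m) : digitSumB m 0 ≤ m := by
  exact digitSumBImpl_le (m.toNat + 1) m hm

-- B's inner loop computes the same value for every sufficient fuel
theorem digitSumBImpl_fuel_irrel (k₁ : Nat) : ∀ (k₂ : Nat) (m x : Int),
    m.toNat < k₁ → m.toNat < k₂ → digitSumBImpl k₁ m x = digitSumBImpl k₂ m x := by
  induction k₁ with
  | zero => intro k₂ m x h; omega
  | succ k ih =>
    intro k₂ m x h1 h2
    obtain ⟨j, rfl⟩ : ∃ j, k₂ = j + 1 := ⟨k₂ - 1, by omega⟩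
    by_cases hm : 0 < m
    · have e1 : digitSumBImpl (k + 1) m x
          = digitSumBImpl k (PySem.Int.floordiv m 10) (x + PySem.Int.mod m 10) := by
        rw [digitSumBImpl, if_pos hm]
      have e2 : digitSumBImpl (j + 1) m x
          = digitSumBImpl j (PySem.Int.floordiv m 10) (x + PySem.Int.mod m 10) := by
        rw [digitSumBImpl, if_pos hm]
      rw [e1, e2]
      have hdiv := PySem.Int.floordiv_eq_ediv_of_pos (a := m) (b := 10) (by norm_num)
      exact ih j _ _ (by omega) (by omega)
    · have e1 : digitSumBImpl (k + 1) m x = x := by rw [digitSumBImpl, if_neg hm]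
      have e2 : digitSumBImpl (j + 1) m x = x := by rw [digitSumBImpl, if_neg hm]
      rw [e1, e2]

-- the digit-character sum equals B's arithmetic digit sum
theorem sum_toDigits_eq_digitSumB (m : Nat) (hm : 0 < m) :
    ((Nat.toDigits 10 m).map digitVal).sum = digitSumB (m : Int) 0 := by
  induction m using Nat.strong_induction_on with
  | _ m ih =>
    have hd : PySem.Int.floordiv (m : Int) 10 = ((m / 10 : Nat) : Int) := by
      exact_mod_cast PySem.Int.floordiv_natCast m 10
    have hmd : PySem.Int.mod (m : Int) 10 = ((m % 10 : Nat) : Int) := by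
      exact_mod_cast PySem.Int.mod_natCast m 10
    have hstep : digitSumB (m : Int) 0 = digitSumB ((m / 10 : Nat) : Int) ((m % 10 : Nat) : Int) := by
      unfold digitSumB
      have ht : ((m : Int)).toNat = m := by omega
      rw [ht, digitSumBImpl, if_pos (by exact_mod_cast hm)]
      rw [hd, hmd, zero_add]
      exact digitSumBImpl_fuel_irrel m _ _ _ (by omega) (by omega)
    rw [Nat.toDigits_eq_if (by norm_num)]
    by_cases h : m < 10
    · rw [if_pos h]
      have h10 : m / 10 = 0 := Nat.div_eq_of_lt h
      have hmod : m % 10 = m := Nat.mod_eq_of_lt h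
      rw [hstep, h10, hmod]
      unfold digitSumB
      rw [digitSumBImpl, if_neg (by norm_num)]
      simp [digitVal_digitChar m h]
    · rw [if_neg h]
      have h1 : 0 < m / 10 := Nat.div_pos (by omega) (by norm_num)
      have h2 : m / 10 < m := Nat.div_lt_self hm (by norm_num)
      rw [List.map_append, List.sum_append]
      simp only [List.map_cons, List.map_nil, List.sum_cons, List.sum_nil]
      rw [digitVal_digitChar (m % 10) (Nat.mod_lt m (by norm_num))]
      rw [ih (m / 10) h2 h1, hstep, digitSumB_acc _ ((m % 10 : Nat) : Int)]
      ring

-- A's string digit sum equals B's arithmetic digit sum on positive n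
theorem digit_sums_agree (n : Int) (hn : 0 < n) : digitLoopA n = digitSumB n 0 := by
  rw [digitLoopA_eq_sum n hn, sum_toDigits_eq_digitSumB n.toNat (by omega)]
  congr 1
  omega

-- A's recursion computes the same value for every sufficient fuel
theorem FImpl_fuel_irrel (k₁ : Nat) : ∀ (k₂ : Nat) (n : Int),
    n.toNat < k₁ → n.toNat < k₂ → FImpl k₁ n = FImpl k₂ n := by
  induction k₁ with
  | zero => intro k₂ n h; omega
  | succ k ih =>
    intro k₂ n h1 h2
    obtain ⟨j, rfl⟩ : ∃ j, k₂ = j + 1 := ⟨k₂ - 1, by omega⟩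
    by_cases hp : 0 < n
    · by_cases he : PySem.Int.mod n 2 = 0
      · have e1 : FImpl (k + 1) n = 2 + FImpl k (PySem.Int.floordiv n 2) := by
          rw [FImpl, if_pos ⟨hp, he⟩]
        have e2 : FImpl (j + 1) n = 2 + FImpl j (PySem.Int.floordiv n 2) := by
          rw [FImpl, if_pos ⟨hp, he⟩]
        rw [e1, e2]
        have hdiv := PySem.Int.floordiv_eq_ediv_of_pos (a := n) (b := 2) (by norm_num)
        exact congrArg (2 + ·) (ih j _ (by omega) (by omega))
      · have hle := digitLoopA_le n hp
        have e1 : FImpl (k + 1) n = 3 + FImpl k (digitLoopA n - 5) := by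
          rw [FImpl, if_neg (by tauto), if_pos ⟨hp, he⟩]
        have e2 : FImpl (j + 1) n = 3 + FImpl j (digitLoopA n - 5) := by
          rw [FImpl, if_neg (by tauto), if_pos ⟨hp, he⟩]
        rw [e1, e2]
        exact congrArg (3 + ·) (ih j _ (by omega) (by omega))
    · have e1 : FImpl (k + 1) n = 0 := by
        rw [FImpl, if_neg (by tauto), if_neg (by tauto)]
      have e2 : FImpl (j + 1) n = 0 := by
        rw [FImpl, if_neg (by tauto), if_neg (by tauto)]
      rw [e1, e2]

-- unfolding lemmas for F
theorem F_base (n : Int) (h : ¬ 0 < n) : F n = 0 := by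
  unfold F
  rw [FImpl, if_neg (by tauto), if_neg (by tauto)]

theorem F_even (n : Int) (hp : 0 < n) (he : PySem.Int.mod n 2 = 0) :
    F n = 2 + F (PySem.Int.floordiv n 2) := by
  unfold F
  rw [FImpl, if_pos ⟨hp, he⟩]
  have hdiv := PySem.Int.floordiv_eq_ediv_of_pos (a := n) (b := 2) (by norm_num)
  exact congrArg (2 + ·) (FImpl_fuel_irrel _ _ _ (by omega) (by omega))

theorem F_odd (n : Int) (hp : 0 < n) (he : ¬ PySem.Int.mod n 2 = 0) :
    F n = 3 + F (digitLoopA n - 5) := by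
  unfold F
  have hle := digitLoopA_le n hp
  rw [FImpl, if_neg (by tauto), if_pos ⟨hp, he⟩]
  exact congrArg (3 + ·) (FImpl_fuel_irrel _ _ _ (by omega) (by omega))

-- loop invariant: with sufficient fuel, B's loop adds F n to the accumulator
theorem F_altLoopImpl_eq (k : Nat) : ∀ (n total : Int),
    n.toNat < k → F_altLoopImpl k n total = total + F n := by
  induction k with
  | zero => intro n total h; omega
  | succ k ih =>
    intro n total h
    by_cases hp : 0 < n
    · by_cases he : PySem.Int.mod n 2 = 0
      · rw [F_altLoopImpl, if_pos hp, if_pos he]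
        have hdiv := PySem.Int.floordiv_eq_ediv_of_pos (a := n) (b := 2) (by norm_num)
        rw [ih _ _ (by omega), F_even n hp he]
        ring
      · rw [F_altLoopImpl, if_pos hp, if_neg he]
        have hle := digitSumB_le n (le_of_lt hp)
        rw [ih _ _ (by omega), F_odd n hp he, digit_sums_agree n hp]
        ring
    · rw [F_altLoopImpl, if_neg hp, F_base n hp]
      ring

-- ===== VERDICT (by name: the statement is the Claim_ definition above) =====
theorem F_spec : Claim_equal_F := by
  intro n _
  unfold Spec_F F_alt
  rw [F_altLoopImpl_eq (n.toNat + 1) n 0 (by omega), zero_add]
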